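-- pv_equiv track=rewrite | github.com/86HenriqueSilva/Loteria_Analyzer | top10_de_dezenas_00a99_1ao5_ERRO.py | atraso_de_dezena
-- ===== SOURCE A (Python) =====
-- def atraso_de_dezena(dezena, numeros):
--     ultimo_concurso = None
--     atraso = 0
--     for concurso, nums in numeros.items():
--         if dezena in nums:
--             atraso = concurso - ultimo_concurso - 1 if ultimo_concurso is not None else 0
--             ultimo_concurso = concurso
--     return atraso
-- ===== SOURCE B (Python) =====
-- def atraso_de_dezena(dezena, numeros):
--     # Scan backwards from the most recent concurso and stop as soon as the
--     # last two occurrences of the dezena are found (early exit).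
--     it = (concurso for concurso, nums in reversed(list(numeros.items())) if dezena in nums)
--     last = next(it, None)
--     if last is None:
--         return 0
--     prev = next(it, None)
--     if prev is None:
--         return 0
--     return last - prev - 1
-- ===== Notes on version B (the rewrite author's own statement) =====
-- stated objective: alternative
-- what changed: Replaced A's forward full pass with a running ultimo_concurso/atraso accumulator by a backward scan over the reversed items that stops as soon as the last two occurrences are found, returning their gap directly.
import Mathlib
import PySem

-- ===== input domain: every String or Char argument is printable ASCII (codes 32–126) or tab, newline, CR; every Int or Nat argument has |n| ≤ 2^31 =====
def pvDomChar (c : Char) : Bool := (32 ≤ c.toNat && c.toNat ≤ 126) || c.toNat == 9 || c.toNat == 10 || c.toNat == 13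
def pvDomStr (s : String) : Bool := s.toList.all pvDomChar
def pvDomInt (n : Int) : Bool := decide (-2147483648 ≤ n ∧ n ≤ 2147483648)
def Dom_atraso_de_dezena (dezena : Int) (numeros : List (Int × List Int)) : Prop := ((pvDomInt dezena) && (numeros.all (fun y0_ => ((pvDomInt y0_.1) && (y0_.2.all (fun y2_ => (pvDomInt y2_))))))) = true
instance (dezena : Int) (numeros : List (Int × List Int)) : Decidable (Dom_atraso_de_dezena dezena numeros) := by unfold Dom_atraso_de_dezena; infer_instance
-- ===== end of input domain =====

-- B scans the items BACKWARDS and stops at the last two occurrences of the dezena,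
-- instead of A's full forward pass with a running ultimo_concurso/atraso accumulator (alternative decomposition).


-- ===== PORT A =====
-- running state (ultimo_concurso : Option Int, atraso : Int), full forward fold
def atraso_de_dezena (dezena : Int) (numeros : List (Int × List Int)) : Int :=
  (numeros.foldl
    (fun (st : Option Int × Int) p =>
      if dezena ∈ p.2 then
        (some p.1, match st.1 with | some u => p.1 - u - 1 | none => 0)
      else st)
    (none, 0)).2

-- ===== PORT B =====
-- first occurrence of the dezena in a (reversed) item list: the generator's `next(it, None)`
def pvFirstHit (dezena : Int) : List (Int × List Int) → Option Int
  | [] => none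
  | p :: rest => if dezena ∈ p.2 then some p.1 else pvFirstHit dezena rest

-- scan for the LAST hit (first in the reversed list), then continue for the one before it
def pvLastTwo (dezena : Int) : List (Int × List Int) → Int
  | [] => 0
  | p :: rest =>
    if dezena ∈ p.2 then
      match pvFirstHit dezena rest with
      | none => 0
      | some prev => p.1 - prev - 1
    else pvLastTwo dezena rest

def atraso_de_dezena_alt (dezena : Int) (numeros : List (Int × List Int)) : Int :=
  pvLastTwo dezena numeros.reverse

-- ===== PRECONDITION & SPEC =====
def Spec_atraso_de_dezena (dezena : Int) (numeros : List (Int × List Int)) (out : Int) : Prop := out = atraso_de_dezena_alt dezena numeros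
instance (dezena : Int) (numeros : List (Int × List Int)) (out : Int) : Decidable (Spec_atraso_de_dezena dezena numeros out) := by unfold Spec_atraso_de_dezena; infer_instance

-- ===== CLAIM (what is proved, stated in full; the proofs are below) =====
def Claim_equal_atraso_de_dezena : Prop := ∀ (dezena : Int) (numeros : List (Int × List Int)), Dom_atraso_de_dezena dezena numeros → Spec_atraso_de_dezena dezena numeros (atraso_de_dezena dezena numeros)

-- ===== LEMMAS AND PROOFS =====

-- A's fold from an arbitrary state, characterised by the reversed hit list.
theorem atraso_fold_char (dezena : Int) (l : List (Int × List Int)) :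
    ∀ (u : Option Int) (a : Int),
    l.foldl
      (fun (st : Option Int × Int) p =>
        if dezena ∈ p.2 then
          (some p.1, match st.1 with | some v => p.1 - v - 1 | none => 0)
        else st)
      (u, a)
    =
    match ((l.filter (fun p => decide (dezena ∈ p.2))).map Prod.fst).reverse with
    | [] => (u, a)
    | [h] => (some h, match u with | some v => h - v - 1 | none => 0)
    | h :: h' :: _ => (some h, h - h' - 1) := by
  induction l with
  | nil => intro u a; simp
  | cons x xs ih =>
    intro u a
    by_cases hx : dezena ∈ x.2
    · simp only [List.foldl_cons, List.filter_cons, hx, decide_true, if_true, List.map_cons,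
        List.reverse_cons]
      rw [ih]
      cases hrev : ((xs.filter (fun p => decide (dezena ∈ p.2))).map Prod.fst).reverse with
      | nil => simp
      | cons h t =>
        cases t with
        | nil => simp
        | cons h' t' => simp
    · simp only [List.foldl_cons, List.filter_cons, hx, decide_false, if_false]
      exact ih u a

-- pvFirstHit is the head of the filtered hit list.
theorem firstHit_char (dezena : Int) (l : List (Int × List Int)) :
    pvFirstHit dezena l = ((l.filter (fun p => decide (dezena ∈ p.2))).map Prod.fst).head? := by
  induction l with
  | nil => simp [pvFirstHit]
  | cons x xs ih =>
    by_cases hx : dezena ∈ x.2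
    · simp [pvFirstHit, hx]
    · simp [pvFirstHit, hx, ih]

-- pvLastTwo on a list = gap between the first two hits of that list.
theorem lastTwo_char (dezena : Int) (l : List (Int × List Int)) :
    pvLastTwo dezena l =
      match (l.filter (fun p => decide (dezena ∈ p.2))).map Prod.fst with
      | a :: b :: _ => a - b - 1
      | _ => 0 := by
  induction l with
  | nil => simp [pvLastTwo]
  | cons x xs ih =>
    by_cases hx : dezena ∈ x.2
    · simp only [pvLastTwo, hx, if_true, List.filter_cons, decide_true, List.map_cons]
      rw [firstHit_char]
      cases h : (xs.filter (fun p => decide (dezena ∈ p.2))).map Prod.fst with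
      | nil => simp
      | cons b t => simp
    · simp only [pvLastTwo, hx, if_false, List.filter_cons, decide_false]
      exact ih

-- ===== VERDICT (by name: the statement is the Claim_ definition above) =====
theorem atraso_de_dezena_spec : Claim_equal_atraso_de_dezena := by
  intro dezena numeros _
  unfold Spec_atraso_de_dezena atraso_de_dezena atraso_de_dezena_alt
  rw [atraso_fold_char, lastTwo_char]
  have hrw : (numeros.reverse.filter (fun p => decide (dezena ∈ p.2))).map Prod.fst
      = ((numeros.filter (fun p => decide (dezena ∈ p.2))).map Prod.fst).reverse := by
    simp [List.filter_reverse, List.map_reverse]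
  rw [hrw]
  cases hrev : ((numeros.filter (fun p => decide (dezena ∈ p.2))).map Prod.fst).reverse with
  | nil => simp
  | cons h t =>
    cases t with
    | nil => simp
    | cons h' t' => simp
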